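-- pv_equiv track=rewrite | github.com/JoYuKang/TIL_Python | pro/124 나라의 숫자.py | solution
-- ===== SOURCE A (Python) =====
-- def solution(n):
--     answer = ''
--     num = ['4','1','2']
--     while n > 0:
--         remain = n%3 #remain = 1
--         n = n //3 # n = 3
--         if remain ==0:
--             n = n-1
--         answer += num[remain]
--     answer = answer[::-1]
--     return answer
-- ===== SOURCE B (Python) =====
-- def solution(n):
--     # Bijective base-3 numeration: shifting by 1 makes the digit map total,
--     # so no conditional carry is needed; recursion builds most-significant-first.
--     if n <= 0:
--         return ''
--     m = n - 1
--     return solution(m // 3) + "124"[m % 3]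
-- ===== Notes on version B (the rewrite author's own statement) =====
-- stated objective: alternative
-- what changed: Replaces A's while loop with conditional carry (q-=1 when n%3==0) plus final string reversal by bijective-numeration recursion on (n-1)//3 indexing a shifted digit table "124" by (n-1)%3, which removes the carry branch and the reversal.
import Mathlib
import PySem

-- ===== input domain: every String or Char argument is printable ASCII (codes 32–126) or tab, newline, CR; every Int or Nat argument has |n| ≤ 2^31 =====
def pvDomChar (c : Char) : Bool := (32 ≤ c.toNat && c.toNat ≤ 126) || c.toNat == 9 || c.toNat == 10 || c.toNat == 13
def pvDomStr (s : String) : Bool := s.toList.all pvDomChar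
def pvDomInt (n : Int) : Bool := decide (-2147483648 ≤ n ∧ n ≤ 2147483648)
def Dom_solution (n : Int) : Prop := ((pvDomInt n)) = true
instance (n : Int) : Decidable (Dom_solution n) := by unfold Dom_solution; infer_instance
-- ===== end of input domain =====

-- B replaces A's conditional-carry while loop plus final reversal by bijective-numeration
-- recursion on (n-1)//3 with the shifted digit table "124"; same cost, different algorithm.

-- ===== PORT A =====
-- A's while loop: state = (n, answer); answer kept as List Char (Python += appends)
def solutionLoop (n : Int) (answer : List Char) : List Char :=
  if 0 < n then
    let remain := PySem.Int.mod n 3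
    let n1 := PySem.Int.floordiv n 3
    let n2 := if remain = 0 then n1 - 1 else n1
    solutionLoop n2 (answer ++ [(PySem.List.pyGet? ['4','1','2'] remain).getD '?'])
  else answer
termination_by n.toNat
decreasing_by
  rw [PySem.Int.floordiv_eq_ediv_of_pos (by omega : (0:Int) < 3),
      PySem.Int.mod_eq_emod_of_pos (by omega : (0:Int) < 3)]
  split <;> omega

-- answer[::-1] is List.reverse on the underlying characters
def solution (n : Int) : String := String.ofList ((solutionLoop n []).reverse)

-- ===== PORT B =====
def solutionAltL (n : Int) : List Char :=
  if n ≤ 0 then []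
  else
    let m := n - 1
    solutionAltL (PySem.Int.floordiv m 3) ++
      [(PySem.List.pyGet? ['1','2','4'] (PySem.Int.mod m 3)).getD '?']
termination_by n.toNat
decreasing_by
  rw [PySem.Int.floordiv_eq_ediv_of_pos (by omega : (0:Int) < 3)]
  omega

def solution_alt (n : Int) : String := String.ofList (solutionAltL n)

-- ===== PRECONDITION & SPEC =====
def Spec_solution (n : Int) (out : String) : Prop := out = solution_alt n
instance (n : Int) (out : String) : Decidable (Spec_solution n out) := by unfold Spec_solution; infer_instance

-- ===== CLAIM (what is proved, stated in full; the proofs are below) =====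
def Claim_equal_solution : Prop := ∀ (n : Int), Dom_solution n → Spec_solution n (solution n)

-- ===== LEMMAS AND PROOFS =====
-- per-step correspondence: A's carried quotient equals B's bijective quotient,
-- and A's digit ['4','1','2'][n%3] equals B's digit ['1','2','4'][(n-1)%3]
theorem step_next (n : Int) :
    (if PySem.Int.mod n 3 = 0 then PySem.Int.floordiv n 3 - 1 else PySem.Int.floordiv n 3)
      = PySem.Int.floordiv (n - 1) 3 := by
  rw [PySem.Int.floordiv_eq_ediv_of_pos (by omega : (0:Int) < 3),
      PySem.Int.floordiv_eq_ediv_of_pos (by omega : (0:Int) < 3),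
      PySem.Int.mod_eq_emod_of_pos (by omega : (0:Int) < 3)]
  split <;> omega

theorem step_char (n : Int) :
    (PySem.List.pyGet? ['4','1','2'] (PySem.Int.mod n 3)).getD '?'
      = (PySem.List.pyGet? ['1','2','4'] (PySem.Int.mod (n - 1) 3)).getD '?' := by
  rw [PySem.Int.mod_eq_emod_of_pos (by omega : (0:Int) < 3),
      PySem.Int.mod_eq_emod_of_pos (by omega : (0:Int) < 3)]
  rcases (by omega : n % 3 = 0 ∨ n % 3 = 1 ∨ n % 3 = 2) with h3 | h3 | h3
  · rw [h3, (by omega : (n - 1) % 3 = 2)]; decide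
  · rw [h3, (by omega : (n - 1) % 3 = 0)]; decide
  · rw [h3, (by omega : (n - 1) % 3 = 1)]; decide

theorem loop_eq_alt (n : Int) (acc : List Char) :
    solutionLoop n acc = acc ++ (solutionAltL n).reverse := by
  rw [solutionLoop, solutionAltL]
  by_cases h : 0 < n
  · simp only [h, if_true, if_neg (by omega : ¬ n ≤ 0)]
    rw [step_next n, step_char n, loop_eq_alt]
    simp [List.reverse_append]
  · simp [h, if_pos (by omega : n ≤ 0)]
termination_by n.toNat
decreasing_by
  rw [PySem.Int.floordiv_eq_ediv_of_pos (by omega : (0:Int) < 3)]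
  omega

-- ===== VERDICT (by name: the statement is the Claim_ definition above) =====
theorem solution_spec : Claim_equal_solution := by
  intro n _
  unfold Spec_solution solution solution_alt
  rw [loop_eq_alt]
  simp
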